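-- pv_equiv track=rewrite | github.com/pddg/MyAssistant | lib/weather.py | parse_date
-- ===== SOURCE A (Python) =====
-- def parse_date(fc_list, date):
--     result = {}
--     for f in fc_list:
--         if date == f['date']:
--             result = f
--         else:
--             pass
--     return result
-- ===== SOURCE B (Python) =====
-- def parse_date(fc_list, date):
--     for f in reversed(fc_list):
--         if f['date'] == date:
--             return f
--     return {}
-- ===== Notes on version B (the rewrite author's own statement) =====
-- stated objective: simpler
-- what changed: B scans the list in reverse and returns the first match immediately (last forward match = first reverse match), instead of A's full forward scan that keeps overwriting an accumulator; the dead else branch disappears.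
import Mathlib
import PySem

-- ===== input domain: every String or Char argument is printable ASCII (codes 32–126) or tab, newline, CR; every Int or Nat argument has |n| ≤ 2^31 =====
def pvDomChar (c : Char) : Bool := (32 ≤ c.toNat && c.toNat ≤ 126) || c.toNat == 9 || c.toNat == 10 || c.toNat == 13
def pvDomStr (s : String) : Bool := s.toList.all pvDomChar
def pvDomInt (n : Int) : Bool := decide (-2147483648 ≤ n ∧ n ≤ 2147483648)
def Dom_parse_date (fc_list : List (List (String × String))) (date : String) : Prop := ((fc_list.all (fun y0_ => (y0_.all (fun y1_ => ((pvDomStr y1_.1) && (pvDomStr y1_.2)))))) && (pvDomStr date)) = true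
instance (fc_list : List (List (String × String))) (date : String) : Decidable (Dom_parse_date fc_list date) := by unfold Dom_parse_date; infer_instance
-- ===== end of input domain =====

-- B replaces A's overwrite-accumulator forward scan by a reverse scan with early return; equivalence of the RETURN value on Pre_.

-- ===== PORT A =====
-- A: result = {}; for f in fc_list: if date == f['date']: result = f; return result
-- f['date'] is the first-match lookup in the association list (Python dict keys are unique).
def parse_date (fc_list : List (List (String × String))) (date : String) : List (String × String) :=
  fc_list.foldl (fun result f => if f.lookup "date" = some date then f else result) []

-- ===== PORT B =====
-- B: for f in reversed(fc_list): if f['date'] == date: return f; return {}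
def parse_date_altGo (date : String) : List (List (String × String)) → List (String × String)
  | [] => []
  | f :: rest => if f.lookup "date" = some date then f else parse_date_altGo date rest

def parse_date_alt (fc_list : List (List (String × String))) (date : String) : List (String × String) :=
  parse_date_altGo date fc_list.reverse

-- ===== PRECONDITION & SPEC =====
-- Pre_ excludes inputs containing an entry without a "date" key, on which Python A raises KeyError.
def Pre_parse_date (fc_list : List (List (String × String))) (date : String) : Prop :=
  fc_list.all (fun f => (f.lookup "date").isSome) = true
instance (fc_list : List (List (String × String))) (date : String) : Decidable (Pre_parse_date fc_list date) := by unfold Pre_parse_date; infer_instance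
def pvWitness_parse_date : (List (List (String × String))) × String := ([[("date", "a")], [("date", "b"), ("t", "1")]], "b")

def Spec_parse_date (fc_list : List (List (String × String))) (date : String) (out : List (String × String)) : Prop := out = parse_date_alt fc_list date
instance (fc_list : List (List (String × String))) (date : String) (out : List (String × String)) : Decidable (Spec_parse_date fc_list date out) := by unfold Spec_parse_date; infer_instance

-- ===== CLAIM =====
def Claim_equal_parse_date : Prop := ∀ (fc_list : List (List (String × String))) (date : String), Dom_parse_date fc_list date → Pre_parse_date fc_list date → Spec_parse_date fc_list date (parse_date fc_list date)

-- ===== LEMMAS AND PROOFS =====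
theorem parse_date_fold_eq (date : String) (xs : List (List (String × String))) (acc : List (String × String)) :
    xs.foldl (fun result f => if f.lookup "date" = some date then f else result) acc
      = match xs.reverse.find? (fun f => f.lookup "date" = some date) with
        | some f => f
        | none => acc := by
  induction xs generalizing acc with
  | nil => simp
  | cons x xs ih =>
    simp only [List.foldl_cons, List.reverse_cons, List.find?_append, ih]
    cases h : xs.reverse.find? (fun f => f.lookup "date" = some date) with
    | some f => simp
    | none =>
      simp only [Option.none_or]
      by_cases hx : x.lookup "date" = some date <;> simp [List.find?, hx]

theorem parse_date_go_eq (date : String) (ys : List (List (String × String))) :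
    parse_date_altGo date ys
      = match ys.find? (fun f => f.lookup "date" = some date) with
        | some f => f
        | none => [] := by
  induction ys with
  | nil => rfl
  | cons y ys ih =>
    by_cases hy : y.lookup "date" = some date <;>
      simp [parse_date_altGo, List.find?, hy, ih]

-- ===== VERDICT =====
theorem parse_date_spec : Claim_equal_parse_date := by
  intro fc_list date _ _
  unfold Spec_parse_date parse_date parse_date_alt
  rw [parse_date_fold_eq, parse_date_go_eq]
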